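-- pv_equiv track=rewrite | github.com/Autodesk/XLB | examples/out_of_core_wind_tunnel/amr.py | morton3D
-- ===== SOURCE A (Python) =====
-- def morton3D(x, y, z):
--     """
--     Compute a 3D Morton code (Z-order curve) for (x, y, z).
--
--     This version uses a naive loop to interleave bits.
--     For large coordinates, you may want to adjust the bit range.
--     """
--     morton_code = 0
--     # Up to 21 bits => up to 2^21 = 2,097,152 in each dimension.
--     # Adjust if you have an even larger domain.
--     for i in range(21):
--         # Shift bits of x, y, z up into appropriate positions
--         bit_mask = 1 << i
--         x_bit = (x & bit_mask) >> i
--         y_bit = (y & bit_mask) >> i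
--         z_bit = (z & bit_mask) >> i
--
--         # Interleave these bits
--         morton_code |= (x_bit << (3*i)) | (y_bit << (3*i + 1)) | (z_bit << (3*i + 2))
--
--     return morton_code
-- ===== SOURCE B (Python) =====
-- # Table-driven Morton encoder: a 128-entry lookup table of 7-bit bit-spreads,
-- # built once; each call combines three table lookups per coordinate instead of
-- # looping over 21 bits.
--
-- _SPREAD7 = [sum(((i >> b) & 1) << (3 * b) for b in range(7)) for i in range(128)]
--
--
-- def _spread(v):
--     v &= 0x1FFFFF
--     return (_SPREAD7[v & 127]
--             + (_SPREAD7[(v >> 7) & 127] << 21)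
--             + (_SPREAD7[v >> 14] << 42))
--
--
-- def morton3D(x, y, z):
--     return _spread(x) + (_spread(y) << 1) + (_spread(z) << 2)
-- ===== Notes on version B (the rewrite author's own statement) =====
-- stated objective: faster
-- what changed: Replaces A's 21-iteration per-bit mask/shift/or interleaving loop by a precomputed 128-entry lookup table of 7-bit bit-spreads: each call masks the coordinate to 21 bits, splits it into three 7-bit chunks, and combines three table lookups per coordinate.
import Mathlib
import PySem

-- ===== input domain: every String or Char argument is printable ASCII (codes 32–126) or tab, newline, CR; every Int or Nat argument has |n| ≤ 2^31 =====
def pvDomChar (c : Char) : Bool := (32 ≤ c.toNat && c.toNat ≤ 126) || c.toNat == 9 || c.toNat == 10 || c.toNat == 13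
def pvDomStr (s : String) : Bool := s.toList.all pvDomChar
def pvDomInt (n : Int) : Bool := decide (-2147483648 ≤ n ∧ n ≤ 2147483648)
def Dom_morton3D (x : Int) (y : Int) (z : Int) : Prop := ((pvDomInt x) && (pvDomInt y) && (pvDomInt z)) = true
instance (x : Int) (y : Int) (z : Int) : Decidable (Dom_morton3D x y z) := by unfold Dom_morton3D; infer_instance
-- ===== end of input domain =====

-- B replaces A's 21-iteration per-bit interleaving loop by a precomputed 128-entry
-- lookup table of 7-bit bit-spreads, combining three table lookups per coordinate
-- (objective: faster; equal return values proved below).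

-- ===== PORT A =====
-- loop body of A's 'for i in range(21)'
def aStep (x : Int) (y : Int) (z : Int) (morton_code : Int) (i : Nat) : Int :=
  let bit_mask : Int := (1 : Int) <<< i
  let x_bit : Int := (PySem.Int.band x bit_mask) >>> i
  let y_bit : Int := (PySem.Int.band y bit_mask) >>> i
  let z_bit : Int := (PySem.Int.band z bit_mask) >>> i
  PySem.Int.bor morton_code
    (PySem.Int.bor (PySem.Int.bor (x_bit <<< (3 * i)) (y_bit <<< (3 * i + 1))) (z_bit <<< (3 * i + 2)))

def morton3D (x : Int) (y : Int) (z : Int) : Int :=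
  (List.range 21).foldl (aStep x y z) 0

-- ===== PORT B =====
-- _SPREAD7 = [sum(((i >> b) & 1) << (3 * b) for b in range(7)) for i in range(128)]
def spread7Table : List Int :=
  (List.range 128).map (fun i =>
    ((List.range 7).map (fun (b : Nat) => (PySem.Int.band (((i : Nat) : Int) >>> b) 1) <<< (3 * b))).sum)

-- def _spread(v)
def mortonSpread (v : Int) : Int :=
  let v' : Int := PySem.Int.band v 0x1FFFFF
  PySem.List.pyGetD spread7Table (PySem.Int.band v' 127) 0
    + (PySem.List.pyGetD spread7Table (PySem.Int.band (v' >>> 7) 127) 0) <<< (21 : Nat)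
    + (PySem.List.pyGetD spread7Table (v' >>> 14) 0) <<< (42 : Nat)

def morton3D_alt (x : Int) (y : Int) (z : Int) : Int :=
  mortonSpread x + (mortonSpread y <<< (1 : Nat)) + (mortonSpread z <<< (2 : Nat))

-- ===== PRECONDITION & SPEC =====
def Spec_morton3D (x : Int) (y : Int) (z : Int) (out : Int) : Prop := out = morton3D_alt x y z
instance (x : Int) (y : Int) (z : Int) (out : Int) : Decidable (Spec_morton3D x y z out) := by unfold Spec_morton3D; infer_instance

-- ===== CLAIM (what is proved, stated in full; the proofs are below) =====
def Claim_equal_morton3D : Prop := ∀ (x : Int) (y : Int) (z : Int), Dom_morton3D x y z → Spec_morton3D x y z (morton3D x y z)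

-- ===== LEMMAS AND PROOFS =====

-- low 21 bits of x, as Python's x & 0x1FFFFF computes them
def nbits (x : Int) : Nat := (x % 2097152).toNat

-- the base-8 digit contributed by bit i of the three coordinates
def digit (nx ny nz i : Nat) : Nat := nx / 2 ^ i % 2 + 2 * (ny / 2 ^ i % 2) + 4 * (nz / 2 ^ i % 2)

-- partial interleave sum over the first k bits (all three coordinates)
def S (nx ny nz k : Nat) : Nat := ((List.range k).map (fun i => digit nx ny nz i * 8 ^ i)).sum

-- per-coordinate interleave sum over the first k bits
def Tx (n k : Nat) : Nat := ((List.range k).map (fun i => n / 2 ^ i % 2 * 8 ^ i)).sum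

-- spread of one 7-bit chunk (the table contents, in Nat)
def Tn (c : Nat) : Nat := ((List.range 7).map (fun b => c / 2 ^ b % 2 * 2 ^ (3 * b))).sum

-- B's per-coordinate value, in Nat
def chunk (n : Nat) : Nat := Tn (n % 128) + Tn (n / 128 % 128) * 2 ^ 21 + Tn (n / 16384) * 2 ^ 42

theorem lor_add_of_lt (a b s : Nat) (h : a < 2 ^ s) : a ||| (b <<< s) = a + b * 2 ^ s := by
  apply Nat.eq_of_testBit_eq
  intro j
  have h2 : a + b * 2 ^ s = 2 ^ s * b + a := by ring
  rw [h2, Nat.testBit_two_pow_mul_add b h j, Nat.testBit_lor, Nat.testBit_shiftLeft]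
  by_cases hj : j < s
  · simp [hj, Nat.not_le.mpr hj]
  · have hf : a.testBit j = false :=
      Nat.testBit_lt_two_pow (lt_of_lt_of_le h (Nat.pow_le_pow_right (by norm_num) (by omega)))
    simp [hj, hf, Nat.le_of_not_lt hj]

theorem nbits_lt (x : Int) : nbits x < 2097152 := by unfold nbits; omega

theorem band_mask (x : Int) : PySem.Int.band x 0x1FFFFF = ((nbits x : Nat) : Int) := by
  rcases x with n | n
  · have h1 : (0x1FFFFF : Int) = ((2097151 : Nat) : Int) := rfl
    have h0 : (Int.ofNat n) = ((n : Nat) : Int) := rfl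
    rw [h0, h1, PySem.Int.band_natCast]
    have h2 : n &&& 2097151 = n % 2097152 := by
      have := Nat.and_two_pow_sub_one_eq_mod n 21
      norm_num at this
      exact this
    rw [h2]
    unfold nbits
    omega
  · have hneg : ¬ (0 : Int) ≤ Int.negSucc n := by omega
    simp only [PySem.Int.band, hneg, if_false, if_pos (by norm_num : (0:Int) ≤ 0x1FFFFF)]
    have h2 : (0x1FFFFF : Int).toNat = 2097151 := rfl
    have h3 : (-(Int.negSucc n) - 1).toNat = n := by
      simp [Int.negSucc_eq]
    rw [h2, h3, Nat.and_comm]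
    have h4 : n &&& 2097151 = n % 2097152 := by
      have := Nat.and_two_pow_sub_one_eq_mod n 21
      norm_num at this
      exact this
    rw [h4]
    unfold nbits
    omega

set_option maxRecDepth 8192 in
theorem bit_mod21 (n i : Nat) (hi : i < 21) : n % 2097152 / 2 ^ i % 2 = n / 2 ^ i % 2 := by
  interval_cases i <;> omega

set_option maxRecDepth 8192 in
theorem bit_compl (m i : Nat) (hm : m < 2097152) (hi : i < 21) :
    2 ^ i - m / 2 ^ i % 2 * 2 ^ i = (2097151 - m) / 2 ^ i % 2 * 2 ^ i := by
  interval_cases i <;> omega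

theorem band_pow (x : Int) (i : Nat) (hi : i < 21) :
    PySem.Int.band x ((1 : Int) <<< i) = ((nbits x / 2 ^ i % 2 * 2 ^ i : Nat) : Int) := by
  have hsh : (1 : Int) <<< i = ((2 ^ i : Nat) : Int) := by
    rw [show (1:Int) = ((1:Nat):Int) from rfl]
    rw [show ((1:Nat):Int) <<< i = ((1 <<< i : Nat) : Int) from rfl, Nat.one_shiftLeft]
  rcases x with n | n
  · rw [show (Int.ofNat n) = ((n : Nat) : Int) from rfl, hsh, PySem.Int.band_natCast]
    rw [Nat.and_two_pow, Nat.toNat_testBit]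
    have hb : nbits ((n : Nat) : Int) = n % 2097152 := by unfold nbits; omega
    rw [hb, bit_mod21 n i hi]
  · have hneg : ¬ (0 : Int) ≤ Int.negSucc n := by omega
    have hpos : (0 : Int) ≤ ((2 ^ i : Nat) : Int) := by positivity
    rw [hsh]
    simp only [PySem.Int.band, hneg, if_false, if_pos hpos]
    have h3 : (-(Int.negSucc n) - 1).toNat = n := by simp [Int.negSucc_eq]
    have h4 : (((2 ^ i : Nat) : Int)).toNat = 2 ^ i := by omega
    rw [h3, h4, Nat.and_comm, Nat.and_two_pow, Nat.toNat_testBit]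
    have hb : nbits (Int.negSucc n) = 2097151 - n % 2097152 := by unfold nbits; omega
    rw [hb]
    have hm : n % 2097152 < 2097152 := Nat.mod_lt _ (by norm_num)
    have := bit_compl (n % 2097152) i hm hi
    rw [bit_mod21 n i hi] at this
    rw [← this]

theorem two_pow_3k (k : Nat) : (2 : Nat) ^ (3 * k) = 8 ^ k := by
  rw [pow_mul]; norm_num

theorem stepNat (a tx ty tz k : Nat) (ha : a < 8 ^ k) (hx : tx ≤ 1) (hy : ty ≤ 1) (_hz : tz ≤ 1) :
    a ||| ((tx * 2 ^ (3 * k) ||| ty * 2 ^ (3 * k + 1)) ||| tz * 2 ^ (3 * k + 2))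
      = a + (tx + 2 * ty + 4 * tz) * 8 ^ k := by
  have hp : (0 : Nat) < 2 ^ (3 * k) := Nat.two_pow_pos _
  have e1 : (2 : Nat) ^ (3 * k + 1) = 2 ^ (3 * k) * 2 := by rw [pow_succ]
  have e2 : (2 : Nat) ^ (3 * k + 2) = 2 ^ (3 * k) * 4 := by rw [pow_succ, pow_succ]; ring
  have h1 := lor_add_of_lt (tx * 2 ^ (3 * k)) ty (3 * k + 1) (by rw [e1]; nlinarith)
  rw [Nat.shiftLeft_eq] at h1
  have h2 := lor_add_of_lt (tx * 2 ^ (3 * k) + ty * 2 ^ (3 * k + 1)) tz (3 * k + 2)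
    (by rw [e2, e1]; nlinarith)
  rw [Nat.shiftLeft_eq] at h2
  rw [h1, h2]
  have h3 : tx * 2 ^ (3 * k) + ty * 2 ^ (3 * k + 1) + tz * 2 ^ (3 * k + 2)
      = (tx + 2 * ty + 4 * tz) <<< (3 * k) := by
    rw [Nat.shiftLeft_eq, e1, e2]; ring
  rw [h3]
  rw [lor_add_of_lt a (tx + 2 * ty + 4 * tz) (3 * k) (by rw [two_pow_3k]; exact ha), two_pow_3k]

theorem digit_le (nx ny nz i : Nat) : digit nx ny nz i ≤ 7 := by
  unfold digit
  have h1 : nx / 2 ^ i % 2 < 2 := Nat.mod_lt _ (by norm_num)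
  have h2 : ny / 2 ^ i % 2 < 2 := Nat.mod_lt _ (by norm_num)
  have h3 : nz / 2 ^ i % 2 < 2 := Nat.mod_lt _ (by norm_num)
  omega

theorem S_succ (nx ny nz k : Nat) :
    S nx ny nz (k + 1) = S nx ny nz k + digit nx ny nz k * 8 ^ k := by
  simp [S, List.range_succ]

theorem S_lt (nx ny nz k : Nat) : S nx ny nz k < 8 ^ k := by
  induction k with
  | zero => simp [S]
  | succ k ih =>
    have hd := digit_le nx ny nz k
    have hmul : digit nx ny nz k * 8 ^ k <= 7 * 8 ^ k := Nat.mul_le_mul_right _ hd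
    rw [S_succ, pow_succ]
    omega

theorem aFold (x y z : Int) (k : Nat) (hk : k <= 21) :
    (List.range k).foldl (aStep x y z) 0 = ((S (nbits x) (nbits y) (nbits z) k : Nat) : Int) := by
  induction k with
  | zero => simp [S]
  | succ k ih =>
    rw [List.range_succ, List.foldl_append, ih (by omega), List.foldl_cons, List.foldl_nil]
    simp only [aStep]
    rw [band_pow x k (by omega), band_pow y k (by omega), band_pow z k (by omega)]
    simp only [show forall (m j : Nat), ((m:Nat):Int) >>> j = ((m >>> j : Nat) : Int) from fun _ _ => rfl,
      show forall (m j : Nat), ((m:Nat):Int) <<< j = ((m <<< j : Nat) : Int) from fun _ _ => rfl]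
    have hdiv : forall t : Nat, (t * 2 ^ k) >>> k = t := by
      intro t
      rw [Nat.shiftRight_eq_div_pow, Nat.mul_div_cancel _ (Nat.two_pow_pos _)]
    rw [hdiv, hdiv, hdiv]
    simp only [Nat.shiftLeft_eq, PySem.Int.bor_natCast]
    rw [stepNat _ _ _ _ k (S_lt _ _ _ k) (by omega) (by omega) (by omega), S_succ]
    unfold digit
    push_cast
    ring

theorem termEq (c b : Nat) :
    (PySem.Int.band (((c : Nat) : Int) >>> b) 1) <<< (3 * b) = ((c / 2 ^ b % 2 * 2 ^ (3 * b) : Nat) : Int) := by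
  rw [show ((c : Nat) : Int) >>> b = ((c >>> b : Nat) : Int) from rfl,
    show (1 : Int) = ((1 : Nat) : Int) from rfl, PySem.Int.band_natCast,
    show ∀ (m j : Nat), ((m:Nat):Int) <<< j = ((m <<< j : Nat) : Int) from fun _ _ => rfl]
  congr 1
  rw [Nat.and_one_is_mod, Nat.shiftRight_eq_div_pow, Nat.shiftLeft_eq]

theorem tableEq (c : Nat) (hc : c < 128) :
    PySem.List.pyGetD spread7Table ((c : Nat) : Int) 0 = ((Tn c : Nat) : Int) := by
  rw [PySem.List.pyGetD_natCast]
  have hlen : c < spread7Table.length := by simp [spread7Table]; exact hc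
  rw [List.getD_eq_getElem _ _ hlen]
  simp only [spread7Table, List.getElem_map, List.getElem_range]
  simp only [termEq]
  rw [show (fun b => ((c / 2 ^ b % 2 * 2 ^ (3 * b) : Nat) : Int))
        = (fun m : Nat => (m : Int)) ∘ (fun b => c / 2 ^ b % 2 * 2 ^ (3 * b)) from rfl]
  rw [← List.map_map, ← Nat.cast_list_sum]
  rfl

theorem bChar (x y z : Int) :
    morton3D_alt x y z = ((chunk (nbits x) + 2 * chunk (nbits y) + 4 * chunk (nbits z) : Nat) : Int) := by
  have hms : ∀ w : Int, mortonSpread w = ((chunk (nbits w) : Nat) : Int) := by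
    intro w
    have hn := nbits_lt w
    simp only [mortonSpread, band_mask]
    simp only [show ((nbits w : Nat) : Int) >>> 7 = ((nbits w >>> 7 : Nat) : Int) from rfl,
      show ((nbits w : Nat) : Int) >>> 14 = ((nbits w >>> 14 : Nat) : Int) from rfl,
      show (127 : Int) = ((127 : Nat) : Int) from rfl, PySem.Int.band_natCast,
      show ∀ n : Nat, n &&& 127 = n % 128 from fun n => by
        have := Nat.and_two_pow_sub_one_eq_mod n 7; norm_num at this; exact this,
      show nbits w >>> 7 = nbits w / 128 from by rw [Nat.shiftRight_eq_div_pow],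
      show nbits w >>> 14 = nbits w / 16384 from by rw [Nat.shiftRight_eq_div_pow]]
    rw [tableEq _ (Nat.mod_lt _ (by norm_num)), tableEq _ (Nat.mod_lt _ (by norm_num)),
      tableEq _ (by omega)]
    simp only [show ∀ (m j : Nat), ((m:Nat):Int) <<< j = ((m <<< j : Nat) : Int) from fun _ _ => rfl,
      Nat.shiftLeft_eq]
    unfold chunk
    push_cast
    norm_num
  rw [morton3D_alt, hms x, hms y, hms z]
  simp only [show ∀ (m j : Nat), ((m:Nat):Int) <<< j = ((m <<< j : Nat) : Int) from fun _ _ => rfl,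
    Nat.shiftLeft_eq]
  push_cast
  ring

theorem S_split (nx ny nz k : Nat) : S nx ny nz k = Tx nx k + 2 * Tx ny k + 4 * Tx nz k := by
  induction k with
  | zero => simp [S, Tx]
  | succ k ih =>
    have hT : ∀ n, Tx n (k + 1) = Tx n k + n / 2 ^ k % 2 * 8 ^ k := fun n => by
      simp [Tx, List.range_succ]
    rw [S_succ, hT, hT, hT, ih]
    unfold digit
    ring

theorem atom_c1 (n : Nat) : n % 128 / 2 % 2 = n / 2 % 2 := by omega
theorem atom_g1 (n : Nat) : n / 128 / 2 % 2 = n / 256 % 2 := by omega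
theorem atom_f1 (n : Nat) : n / 16384 / 2 % 2 = n / 32768 % 2 := by omega
theorem atom_c2 (n : Nat) : n % 128 / 4 % 2 = n / 4 % 2 := by omega
theorem atom_g2 (n : Nat) : n / 128 / 4 % 2 = n / 512 % 2 := by omega
theorem atom_f2 (n : Nat) : n / 16384 / 4 % 2 = n / 65536 % 2 := by omega
theorem atom_c3 (n : Nat) : n % 128 / 8 % 2 = n / 8 % 2 := by omega
theorem atom_g3 (n : Nat) : n / 128 / 8 % 2 = n / 1024 % 2 := by omega
theorem atom_f3 (n : Nat) : n / 16384 / 8 % 2 = n / 131072 % 2 := by omega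
theorem atom_c4 (n : Nat) : n % 128 / 16 % 2 = n / 16 % 2 := by omega
theorem atom_g4 (n : Nat) : n / 128 / 16 % 2 = n / 2048 % 2 := by omega
theorem atom_f4 (n : Nat) : n / 16384 / 16 % 2 = n / 262144 % 2 := by omega
theorem atom_c5 (n : Nat) : n % 128 / 32 % 2 = n / 32 % 2 := by omega
theorem atom_g5 (n : Nat) : n / 128 / 32 % 2 = n / 4096 % 2 := by omega
theorem atom_f5 (n : Nat) : n / 16384 / 32 % 2 = n / 524288 % 2 := by omega
theorem atom_c6 (n : Nat) : n % 128 / 64 % 2 = n / 64 % 2 := by omega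
theorem atom_g6 (n : Nat) : n / 128 / 64 % 2 = n / 8192 % 2 := by omega
theorem atom_f6 (n : Nat) : n / 16384 / 64 % 2 = n / 1048576 % 2 := by omega

theorem chunkEq (n : Nat) : Tx n 21 = chunk n := by
  unfold chunk Tn Tx
  simp only [List.range_succ, List.range_zero, List.map_append, List.map_cons,
    List.map_nil, List.sum_append, List.sum_cons, List.sum_nil]
  norm_num
  simp only [atom_c1, atom_g1, atom_f1, atom_c2, atom_g2, atom_f2, atom_c3, atom_g3, atom_f3, atom_c4, atom_g4, atom_f4, atom_c5, atom_g5, atom_f5, atom_c6, atom_g6, atom_f6]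
  ring

-- ===== VERDICT (by name: the statement is the Claim_ definition above) =====
theorem morton3D_spec : Claim_equal_morton3D := by
  intro x y z _
  show morton3D x y z = morton3D_alt x y z
  rw [morton3D, aFold x y z 21 (by norm_num), bChar, S_split, chunkEq, chunkEq, chunkEq]
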